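-- pv_equiv track=rewrite | github.com/siladrenja/SilaCppPreprocesor | SilaCppPreprocessor.py | find_next_nonblank
-- ===== SOURCE A (Python) =====
-- def find_next_nonblank(text: str, start: int) -> int:
--     n = len(text)
--     i = start
--     while i < n:
--         nl = text.find("\n", i)
--         if nl == -1:
--             return i if text[i:].strip() else n
--         line = text[i:nl]
--         if line.strip() == "":
--             i = nl + 1
--             continue
--         return i
--     return n
-- ===== SOURCE B (Python) =====
-- def find_next_nonblank(text: str, start: int) -> int:
--     # Single character-level pass: track the start of the current line; the
--     # answer is the line start at the first non-whitespace character.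
--     line_start = start
--     for j in range(start, len(text)):
--         c = text[j]
--         if c == "\n":
--             line_start = j + 1
--         elif not c.isspace():
--             return line_start
--     return len(text)
-- ===== Notes on version B (the rewrite author's own statement) =====
-- stated objective: alternative
-- what changed: B replaces A's line-oriented loop (repeated str.find for the next newline, slicing the line out and strip()-testing it) by a single character-level scan that keeps a running line_start and returns it at the first non-whitespace character; no find, no slicing, no strip.
-- outside the precondition, e.g. on find_next_nonblank(' \nb', -3): A returns 2, B returns -1; on find_next_nonblank('a', -5): A returns -5, B raises IndexError
import Mathlib
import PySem

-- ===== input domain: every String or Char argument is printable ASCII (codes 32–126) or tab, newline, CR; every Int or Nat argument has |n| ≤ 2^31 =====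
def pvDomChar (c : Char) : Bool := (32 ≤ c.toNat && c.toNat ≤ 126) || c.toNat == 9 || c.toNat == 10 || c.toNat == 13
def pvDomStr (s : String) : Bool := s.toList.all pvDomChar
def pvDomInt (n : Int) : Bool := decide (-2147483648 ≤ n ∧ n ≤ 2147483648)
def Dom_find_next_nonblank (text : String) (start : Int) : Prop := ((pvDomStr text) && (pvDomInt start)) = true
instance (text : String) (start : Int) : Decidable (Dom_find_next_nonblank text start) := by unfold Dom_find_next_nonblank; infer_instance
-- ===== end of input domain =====

-- B replaces A's line-wise find/slice/strip loop by one character-level scan carrying the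
-- current line's start (alternative decomposition; same O(n) cost).

-- ===== PORT A =====
-- A's while-loop, one fuel unit per iteration (pure totality guard: i strictly increases each
-- iteration, so fuel = len(text)+1 at the call site is never exhausted; fuel 0 yields the
-- loop's fall-through value n).
def findNNGo : Nat → List Char → Int → Int → Int
  | 0, _, n, _ => n
  | fuel + 1, cs, n, i =>
    if i < n then
      let nl := PySem.Chars.findFrom cs ['\n'] i none
      if nl = -1 then
        (if PySem.Chars.strip (PySem.List.slice cs (some i) none) ≠ [] then i else n)
      else
        if PySem.Chars.strip (PySem.List.slice cs (some i) (some nl)) = [] then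
          findNNGo fuel cs n (nl + 1)
        else i
    else n

def find_next_nonblank (text : String) (start : Int) : Int :=
  findNNGo (text.toList.length + 1) text.toList (text.toList.length : Int) start

-- ===== PORT B =====
-- B's for-loop over range(start, len(text)): lineStart is reset after each '\n', and the first
-- non-whitespace character returns lineStart.  Fuel is the same totality guard (j increases by
-- one per iteration); the 'none' branch of pyGet? is Python's IndexError (reachable only for
-- start < -len(text), outside Pre_).
def altScan : Nat → List Char → Int → Int → Int
  | 0, cs, _, _ => (cs.length : Int)
  | fuel + 1, cs, lineStart, j =>
    if j < (cs.length : Int) then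
      match PySem.List.pyGet? cs j with
      | some c =>
        if c = '\n' then altScan fuel cs (j + 1) (j + 1)
        else if PySem.Chars.isspace c then altScan fuel cs lineStart (j + 1)
        else lineStart
      | none => 0
    else (cs.length : Int)

def find_next_nonblank_alt (text : String) (start : Int) : Int :=
  altScan (text.toList.length + 1) text.toList start start

-- ===== PRECONDITION & SPEC =====
-- Pre_ excludes negative start (outside the natural domain of indices into text): there Python's
-- negative-index/slice wraparound makes A return an accidental mix of negative and absolute
-- positions that no caller would specify, and B's negative indexing wraps differently or raises.
def Pre_find_next_nonblank (text : String) (start : Int) : Prop := 0 ≤ start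
instance (text : String) (start : Int) : Decidable (Pre_find_next_nonblank text start) := by
  unfold Pre_find_next_nonblank; infer_instance

def pvWitness_find_next_nonblank : String × Int := ("  \n hi\n", 0)

def Spec_find_next_nonblank (text : String) (start : Int) (out : Int) : Prop :=
  out = find_next_nonblank_alt text start
instance (text : String) (start : Int) (out : Int) : Decidable (Spec_find_next_nonblank text start out) := by
  unfold Spec_find_next_nonblank; infer_instance

-- ===== CLAIM (what is proved, stated in full; the proofs are below) =====
def Claim_equal_find_next_nonblank : Prop := ∀ (text : String) (start : Int), Dom_find_next_nonblank text start → Pre_find_next_nonblank text start → Spec_find_next_nonblank text start (find_next_nonblank text start)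

-- ===== LEMMAS AND PROOFS =====

-- strip l = [] iff every character is whitespace
theorem strip_eq_nil_iff (l : List Char) :
    PySem.Chars.strip l = [] ↔ ∀ c ∈ l, PySem.Chars.isspace c := by
  unfold PySem.Chars.strip PySem.Chars.rstrip PySem.Chars.lstrip
  rw [List.reverse_eq_nil_iff, List.dropWhile_eq_nil_iff]
  constructor
  · intro h c hc
    rw [← List.takeWhile_append_dropWhile (p := PySem.Chars.isspace) (l := l)] at hc
    rcases List.mem_append.mp hc with h1 | h2
    · exact List.mem_takeWhile_imp h1
    · exact h c (List.mem_reverse.mpr h2)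
  · intro h c hc
    exact h c ((List.dropWhile_sublist _).subset (List.mem_reverse.mp hc))

-- both loops fall through to n / len(text) once the index passes the end
theorem findNNGo_at_end (cs : List Char) (n i : Int) (f : Nat) (h : n ≤ i) :
    findNNGo f cs n i = n := by
  cases f with
  | zero => rfl
  | succ f => simp only [findNNGo]; rw [if_neg (not_lt.mpr h)]

theorem altScan_at_end (cs : List Char) (ls j : Int) (f : Nat) (h : (cs.length : Int) ≤ j) :
    altScan f cs ls j = (cs.length : Int) := by
  cases f with
  | zero => rfl
  | succ f => simp only [altScan]; rw [if_neg (not_lt.mpr h)]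

-- altScan walks unchanged over a block of whitespace characters containing no newline
theorem scan_seg (cs : List Char) (ls : Int) :
    ∀ (d k f : Nat) (hb : k + d ≤ cs.length) (hf : cs.length ≤ k + f),
    (∀ i, k ≤ i → (h2 : i < k + d) →
        cs[i]'(by omega) ≠ '\n' ∧ PySem.Chars.isspace (cs[i]'(by omega))) →
    altScan f cs ls (k : Int) = altScan (f - d) cs ls ((k + d : Nat) : Int) := by
  intro d
  induction d with
  | zero => intro k f _ _ _; rfl
  | succ d ih =>
    intro k f hb hf hws
    have hk : k < cs.length := by omega
    cases f with
    | zero => omega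
    | succ f =>
      have hget : PySem.List.pyGet? cs (k : Int) = some (cs[k]'hk) := by
        rw [PySem.List.pyGet?_natCast, List.getElem?_eq_getElem hk]
      obtain ⟨hne, hsp⟩ := hws k (le_refl _) (by omega)
      simp only [altScan]
      rw [if_pos (by exact_mod_cast hk), hget]
      simp only [if_neg hne, if_pos hsp]
      have hc1 : (k : Int) + 1 = ((k + 1 : Nat) : Int) := by push_cast; ring
      rw [hc1, ih (k + 1) f (by omega) (by omega) (fun i h1 h2 => hws i (by omega) (by omega))]
      rw [show f - d = f + 1 - (d + 1) by omega, show k + 1 + d = k + (d + 1) by omega]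

-- after a whitespace block, a non-whitespace character returns the carried line start
theorem scan_hits (cs : List Char) (ls : Int) (k j0 f : Nat)
    (hlt : k + j0 < cs.length) (hf : cs.length ≤ k + f)
    (hws : ∀ i, k ≤ i → (h2 : i < k + j0) →
        cs[i]'(by omega) ≠ '\n' ∧ PySem.Chars.isspace (cs[i]'(by omega)))
    (hns : ¬ PySem.Chars.isspace (cs[k + j0]'hlt)) :
    altScan f cs ls (k : Int) = ls := by
  rw [scan_seg cs ls j0 k f (by omega) hf hws]
  have hget : PySem.List.pyGet? cs ((k + j0 : Nat) : Int) = some (cs[k + j0]'hlt) := by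
    rw [PySem.List.pyGet?_natCast, List.getElem?_eq_getElem hlt]
  have hne : cs[k + j0]'hlt ≠ '\n' := by
    intro h; apply hns; rw [h]; decide
  rw [show f - j0 = (f - j0 - 1) + 1 by omega]
  simp only [altScan]
  rw [if_pos (by exact_mod_cast hlt), hget]
  simp only [if_neg hne, if_neg hns]

-- a fully-whitespace, newline-free tail scans to the end of the string
theorem scan_all (cs : List Char) (ls : Int) (k f : Nat) (hk : k ≤ cs.length)
    (hf : cs.length ≤ k + f)
    (hws : ∀ i, k ≤ i → (h2 : i < cs.length) →
        cs[i]'h2 ≠ '\n' ∧ PySem.Chars.isspace cs[i]) :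
    altScan f cs ls (k : Int) = (cs.length : Int) := by
  rw [scan_seg cs ls (cs.length - k) k f (by omega) hf (fun i h1 h2 => hws i h1 (by omega))]
  rw [show k + (cs.length - k) = cs.length by omega]
  exact altScan_at_end cs ls _ _ (le_refl _)

-- the main induction: A's line loop equals B's character scan at every line start
theorem go_eq (cs : List Char) :
    ∀ (m k fA fB : Nat), cs.length - k ≤ m → cs.length ≤ k + fA → cs.length ≤ k + fB →
      findNNGo fA cs (cs.length : Int) (k : Int) = altScan fB cs (k : Int) (k : Int) := by
  intro m
  induction m with
  | zero =>
    intro k fA fB hk _ _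
    have hle : cs.length ≤ k := by omega
    rw [findNNGo_at_end cs _ _ fA (by exact_mod_cast hle),
      altScan_at_end cs _ _ fB (by exact_mod_cast hle)]
  | succ m ih =>
    intro k fA fB hk hfA hfB
    by_cases hlt : k < cs.length
    case neg =>
      have hle : cs.length ≤ k := Nat.le_of_not_lt hlt
      rw [findNNGo_at_end cs _ _ fA (by exact_mod_cast hle),
        altScan_at_end cs _ _ fB (by exact_mod_cast hle)]
    case pos =>
      have hkle : k ≤ cs.length := Nat.le_of_lt hlt
      have hff := PySem.Chars.findFrom_natCast cs ['\n'] k hkle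
      set t := cs.drop k with ht
      have htlen : t.length = cs.length - k := by rw [ht, List.length_drop]
      have htget : ∀ (i : Nat) (h : i < t.length), t[i]'h = cs[k + i]'(by omega) := by
        intro i h; exact List.getElem_drop
      have htget2 : ∀ (i : Nat), k ≤ i → (h2 : i < cs.length) →
          t[i - k]'(by rw [htlen]; omega) = cs[i]'h2 := by
        intro i h1 h2
        refine Option.some_inj.mp ?_
        rw [← List.getElem?_eq_getElem, ← List.getElem?_eq_getElem, ht, List.getElem?_drop,
          show k + (i - k) = i by omega]
      cases fA with
      | zero => omega
      | succ fA =>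
      simp only [findNNGo]
      rw [if_pos (by exact_mod_cast hlt)]
      by_cases hf : PySem.Chars.find t ['\n'] = -1
      case pos =>
        have hnl : PySem.Chars.findFrom cs ['\n'] (k : Int) none = -1 := by
          rw [hff, if_pos hf]
        rw [hnl, if_pos rfl]
        have hmem : '\n' ∉ t := by
          have hni := (PySem.Chars.find_eq_neg_one_iff t ['\n']).mp hf
          intro hm
          exact hni ((List.singleton_infix_iff _ _).mpr hm)
        have hnonl : ∀ (i : Nat), k ≤ i → (h2 : i < cs.length) → cs[i]'h2 ≠ '\n' := by
          intro i h1 h2 hcon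
          apply hmem
          have hi : i - k < t.length := by omega
          rw [← hcon, ← htget2 i h1 h2]
          exact List.getElem_mem hi
        rw [PySem.List.slice_from_natCast, ← ht]
        by_cases hst : PySem.Chars.strip t = []
        · rw [if_neg (by simp [hst])]
          have hall := (strip_eq_nil_iff t).mp hst
          rw [scan_all cs (k : Int) k fB hkle hfB (fun i h1 h2 => ⟨hnonl i h1 h2, by
            have hi : i - k < t.length := by omega
            rw [← htget2 i h1 h2]; exact hall _ (List.getElem_mem hi)⟩)]
        · rw [if_pos hst]
          have hex : ∃ c ∈ t, (!PySem.Chars.isspace c) = true := by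
            by_contra hc
            apply hst
            apply (strip_eq_nil_iff t).mpr
            intro c hcm
            by_contra hcs
            exact hc ⟨c, hcm, by simp [hcs]⟩
          have hj0lt : t.findIdx (fun c => !PySem.Chars.isspace c) < t.length :=
            List.findIdx_lt_length_of_exists hex
          set j0 := t.findIdx (fun c => !PySem.Chars.isspace c) with hj0
          have hpj0 : ¬ PySem.Chars.isspace (t[j0]'hj0lt) := by
            have := List.findIdx_getElem (w := hj0lt)
            simpa using this
          have hmin : ∀ (i : Nat) (h : i < j0), PySem.Chars.isspace (t[i]'(by omega)) := by
            intro i h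
            have := List.not_of_lt_findIdx (p := fun c => !PySem.Chars.isspace c) (xs := t) h
            simpa using this
          have hklt : k + j0 < cs.length := by omega
          rw [scan_hits cs (k : Int) k j0 fB hklt hfB (fun i h1 h2 => by
                have hi : i - k < j0 := by omega
                exact ⟨hnonl i h1 (by omega), by
                  rw [← htget2 i h1 (by omega)]; exact hmin (i - k) hi⟩)
              (by rw [← htget j0 hj0lt]; exact hpj0)]
      case neg =>
        have hge : 0 ≤ PySem.Chars.find t ['\n'] := by
          have := PySem.Chars.neg_one_le_find t ['\n']; omega
        set j := (PySem.Chars.find t ['\n']).toNat with hj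
        have hjf : PySem.Chars.find t ['\n'] = (j : Int) := by omega
        obtain ⟨hpre, hmin⟩ := PySem.Chars.find_spec (s := t) (sub := ['\n']) hge
        obtain ⟨u, hu⟩ := hpre
        rw [← hj] at hu hmin
        have hjlt : j < t.length := by
          by_contra hc
          rw [List.drop_of_length_le (by omega)] at hu
          exact absurd hu (by simp)
        have htj : t[j]'hjlt = '\n' := by
          refine Option.some_inj.mp ?_
          rw [← List.getElem?_eq_getElem hjlt]
          have h0 := congrArg (fun l => l[0]?) hu
          simpa [List.getElem?_drop] using h0.symm
        have hnotnl : ∀ (i : Nat) (h : i < j), t[i]'(by omega) ≠ '\n' := by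
          intro i hij hcon
          apply hmin i hij
          have hit : i < t.length := by omega
          have hdropi : t.drop i = t[i]'hit :: t.drop (i + 1) := (List.getElem_cons_drop hit).symm
          rw [hdropi, hcon]
          exact ⟨_, rfl⟩
        have hnlval : PySem.Chars.findFrom cs ['\n'] (k : Int) none = ((k + j : Nat) : Int) := by
          rw [hff, if_neg hf, hjf]; push_cast; ring
        rw [hnlval, if_neg (by omega)]
        rw [PySem.List.slice_natCast, Nat.add_sub_cancel_left, ← ht]
        have hlinelen : (t.take j).length = j := by simp [Nat.le_of_lt hjlt]
        by_cases hsl : PySem.Chars.strip (t.take j) = []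
        case pos =>
          rw [if_pos hsl]
          have hall := (strip_eq_nil_iff (t.take j)).mp hsl
          have hwsj : ∀ (i : Nat), k ≤ i → (h2 : i < k + j) →
              cs[i]'(by omega) ≠ '\n' ∧ PySem.Chars.isspace (cs[i]'(by omega)) := by
            intro i h1 h2
            have hi : i - k < j := by omega
            constructor
            · rw [← htget2 i h1 (by omega)]; exact hnotnl (i - k) hi
            · rw [← htget2 i h1 (by omega)]
              have : t[i - k]'(by omega) = (t.take j)[i - k]'(by rw [hlinelen]; omega) :=
                (List.getElem_take).symm
              rw [this]
              exact hall _ (List.getElem_mem _)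
          rw [scan_seg cs (k : Int) j k fB (by omega) hfB hwsj]
          have hklt : k + j < cs.length := by omega
          have hget : PySem.List.pyGet? cs ((k + j : Nat) : Int) = some (cs[k + j]'hklt) := by
            rw [PySem.List.pyGet?_natCast, List.getElem?_eq_getElem hklt]
          have hcnl : cs[k + j]'hklt = '\n' := by rw [← htget j hjlt]; exact htj
          rw [show fB - j = (fB - j - 1) + 1 by omega]
          simp only [altScan]
          rw [if_pos (by exact_mod_cast hklt), hget]
          simp only [if_pos hcnl]
          have hc1 : ((k + j : Nat) : Int) + 1 = ((k + j + 1 : Nat) : Int) := by push_cast; ring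
          rw [hc1]
          exact ih (k + j + 1) fA (fB - j - 1) (by omega) (by omega) (by omega)
        case neg =>
          rw [if_neg hsl]
          have hex : ∃ c ∈ t.take j, (!PySem.Chars.isspace c) = true := by
            by_contra hc
            apply hsl
            apply (strip_eq_nil_iff _).mpr
            intro c hcm
            by_contra hcs
            exact hc ⟨c, hcm, by simp [hcs]⟩
          have hj0lt' : (t.take j).findIdx (fun c => !PySem.Chars.isspace c) < (t.take j).length :=
            List.findIdx_lt_length_of_exists hex
          set j0 := (t.take j).findIdx (fun c => !PySem.Chars.isspace c) with hj0
          have hj0j : j0 < j := by omega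
          have hpj0 : PySem.Chars.isspace (t[j0]'(by omega)) = false := by
            have h := List.findIdx_getElem (w := hj0lt')
            simp only [Bool.not_eq_true', List.getElem_take] at h
            exact h
          have hmin0 : ∀ (i : Nat) (h : i < j0), PySem.Chars.isspace (t[i]'(by omega)) := by
            intro i h
            have h2 := List.not_of_lt_findIdx (p := fun c => !PySem.Chars.isspace c)
              (xs := t.take j) (by rw [← hj0]; exact h)
            simp only [List.getElem_take, Bool.not_eq_eq_eq_not, Bool.not_false] at h2
            exact h2
          have hklt : k + j0 < cs.length := by omega
          rw [scan_hits cs (k : Int) k j0 fB hklt hfB (fun i h1 h2 => by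
                have hi : i - k < j0 := by omega
                constructor
                · rw [← htget2 i h1 (by omega)]; exact hnotnl (i - k) (by omega)
                · rw [← htget2 i h1 (by omega)]; exact hmin0 (i - k) hi)
              (by rw [← htget j0 (by omega)]; simp [hpj0])]

-- ===== VERDICT (by name: the statement is the Claim_ definition above) =====
theorem find_next_nonblank_spec : Claim_equal_find_next_nonblank := by
  intro text start _hdom hpre
  have h0 : 0 ≤ start := hpre
  unfold Spec_find_next_nonblank find_next_nonblank find_next_nonblank_alt
  have hk : start = ((start.toNat : Nat) : Int) := (Int.toNat_of_nonneg h0).symm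
  rw [hk]
  exact go_eq text.toList text.toList.length start.toNat (text.toList.length + 1)
    (text.toList.length + 1) (by omega) (by omega) (by omega)
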